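-- pv_equiv track=rewrite | github.com/wyk18703232953/myResearch | codeComplex/data copy/filteredData/python/logn/python_logn_0152.py | solve_single_case
-- ===== SOURCE A (Python) =====
-- def getSum(a):
--     return a * (a + 1) // 2
--
-- def getSumOfTwo(a, b):
--     if a <= 1:
--         return getSum(b)
--     return getSum(b) - getSum(a - 1)
--
-- def solve_single_case(n, k):
--     if n == 1:
--         return 0
--     if n <= k:
--         return 1
--     if getSum(k - 1) < n - 1:
--         return -1
--
--     n -= 1
--     k -= 1
--     left, right = 1, k
--     while left < right:
--         mid = (left + right) // 2
--         sum1 = getSumOfTwo(mid, k)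
--         if sum1 == n:
--             return k - mid + 1
--         if sum1 > n:
--             left = mid + 1
--
--         else:
--             right = mid
--     return k - left + 2
-- ===== SOURCE B (Python) =====
-- def solve_single_case(n, k):
--     if n == 1:
--         return 0
--     if n <= k:
--         return 1
--     if (k - 1) * k // 2 < n - 1:
--         return -1
--     n -= 1
--     k -= 1
--     s = 0
--     count = 0
--     for i in range(k, 0, -1):
--         s += i
--         count += 1
--         if s >= n:
--             return count
--     return count
-- ===== Notes on version B (the rewrite author's own statement) =====
-- stated objective: simpler
-- what changed: Replaces the binary search (with its separate exact-hit and convergence returns) by a single descending accumulation over range(k,0,-1) that counts the largest integers until their running sum reaches n.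
-- outside the precondition, e.g. on solve_single_case(5, -4): A returns -4, B returns 0
import Mathlib
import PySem

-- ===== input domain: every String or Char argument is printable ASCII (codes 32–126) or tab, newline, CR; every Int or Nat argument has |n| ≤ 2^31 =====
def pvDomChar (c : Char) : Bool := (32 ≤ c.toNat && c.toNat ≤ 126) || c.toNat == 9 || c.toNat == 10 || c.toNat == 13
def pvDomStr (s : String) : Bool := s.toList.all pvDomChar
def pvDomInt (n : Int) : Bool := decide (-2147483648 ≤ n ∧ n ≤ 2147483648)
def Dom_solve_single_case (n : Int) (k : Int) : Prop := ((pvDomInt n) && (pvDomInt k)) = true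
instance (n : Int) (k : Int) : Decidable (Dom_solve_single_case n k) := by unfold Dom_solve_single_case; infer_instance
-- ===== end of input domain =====

-- B replaces A's binary search by a single descending accumulation over range(k-1,0,-1); simpler, not faster.

-- ===== PORT A =====
def getSum (a : Int) : Int := PySem.Int.floordiv (a * (a + 1)) 2

def getSumOfTwo (a : Int) (b : Int) : Int :=
  if a ≤ 1 then getSum b else getSum b - getSum (a - 1)

def solveLoopA (n : Int) (k : Int) (left : Int) (right : Int) : Int :=
  if _h : left < right then
    let mid := PySem.Int.floordiv (left + right) 2
    let sum1 := getSumOfTwo mid k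
    if sum1 = n then k - mid + 1
    else if sum1 > n then solveLoopA n k (mid + 1) right
    else solveLoopA n k left mid
  else k - left + 2
termination_by (right - left).toNat
decreasing_by
  all_goals
    simp only [PySem.Int.floordiv_eq_ediv_of_pos (show (0:Int) < 2 by norm_num)]
    omega

def solve_single_case (n : Int) (k : Int) : Int :=
  if n = 1 then 0
  else if n ≤ k then 1
  else if getSum (k - 1) < n - 1 then -1
  else solveLoopA (n - 1) (k - 1) 1 (k - 1)

-- ===== PORT B =====
def solveLoopB (n : Int) (s : Int) (count : Int) : List Int → Int
  | [] => count
  | i :: rest =>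
      if n ≤ s + i then count + 1 else solveLoopB n (s + i) (count + 1) rest

def solve_single_case_alt (n : Int) (k : Int) : Int :=
  if n = 1 then 0
  else if n ≤ k then 1
  else if PySem.Int.floordiv ((k - 1) * k) 2 < n - 1 then -1
  else solveLoopB (n - 1) 0 0 (PySem.List.pyRange (k - 1) 0 (-1))

-- ===== PRECONDITION & SPEC =====
-- Pre_ excludes nonpositive k on the inputs that reach the main search (outside the
-- task's natural domain k ≥ 1): there A falls through the empty binary search and
-- returns the accidental value k, while B's empty descending loop returns 0.
def Pre_solve_single_case (n : Int) (k : Int) : Prop :=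
  1 ≤ k ∨ n = 1 ∨ n ≤ k ∨ (k - 1) * k < 2 * (n - 1)
instance (n : Int) (k : Int) : Decidable (Pre_solve_single_case n k) := by
  unfold Pre_solve_single_case; infer_instance

def pvWitness_solve_single_case : Int × Int := (10, 5)

def Spec_solve_single_case (n : Int) (k : Int) (out : Int) : Prop := out = solve_single_case_alt n k
instance (n : Int) (k : Int) (out : Int) : Decidable (Spec_solve_single_case n k out) := by unfold Spec_solve_single_case; infer_instance

-- ===== CLAIM (what is proved, stated in full; the proofs are below) =====
def Claim_equal_solve_single_case : Prop := ∀ (n : Int) (k : Int), Dom_solve_single_case n k → Pre_solve_single_case n k → Spec_solve_single_case n k (solve_single_case n k)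

-- ===== LEMMAS AND PROOFS =====

theorem getSum_mul2 (a : Int) : 2 * getSum a = a * (a + 1) := by
  rw [getSum, PySem.Int.floordiv_eq_ediv_of_pos (show (0:Int) < 2 by norm_num)]
  exact Int.mul_ediv_cancel' (Int.even_mul_succ_self a).two_dvd

theorem getSum_mono {x y : Int} (hx : 0 ≤ x) (hxy : x ≤ y) : getSum x ≤ getSum y := by
  have h1 := getSum_mul2 x
  have h2 := getSum_mul2 y
  nlinarith

-- sum of the integers m..K
def Ssum (K : Int) (m : Int) : Int := getSum K - getSum (m - 1)

theorem Ssum_step (K m : Int) : Ssum K m = Ssum K (m + 1) + m := by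
  have h1 := getSum_mul2 m
  have h2 := getSum_mul2 (m - 1)
  have h3 : m * (m + 1) - (m - 1) * (m - 1 + 1) = 2 * m := by ring
  unfold Ssum
  rw [show m + 1 - 1 = m from by ring]
  linarith

theorem Ssum_anti {K a b : Int} (ha : 1 ≤ a) (hab : a ≤ b) : Ssum K b ≤ Ssum K a := by
  have := getSum_mono (x := a - 1) (y := b - 1) (by omega) (by omega)
  unfold Ssum; omega

theorem Ssum_one (K : Int) : Ssum K 1 = getSum K := by
  have h0 : getSum 0 = 0 := by have := getSum_mul2 0; omega
  simp [Ssum, h0]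

theorem Ssum_top (K : Int) : Ssum K (K + 1) = 0 := by
  simp [Ssum]

def GoodIdx (N K m : Int) : Prop := 1 ≤ m ∧ m ≤ K ∧ N ≤ Ssum K m ∧ Ssum K (m + 1) < N

theorem GoodIdx_uniq {N K m₁ m₂ : Int} (h1 : GoodIdx N K m₁) (h2 : GoodIdx N K m₂) :
    m₁ = m₂ := by
  obtain ⟨a1, b1, c1, d1⟩ := h1
  obtain ⟨a2, b2, c2, d2⟩ := h2
  by_contra hne
  rcases lt_or_gt_of_ne hne with h | h
  · have := Ssum_anti (K := K) (a := m₁ + 1) (b := m₂) (by omega) (by omega)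
    omega
  · have := Ssum_anti (K := K) (a := m₂ + 1) (b := m₁) (by omega) (by omega)
    omega

theorem getSumOfTwo_eq_Ssum {m : Int} (K : Int) (hm : 1 ≤ m) :
    getSumOfTwo m K = Ssum K m := by
  unfold getSumOfTwo Ssum
  split_ifs with h
  · have : m = 1 := by omega
    subst this
    have h0 : getSum 0 = 0 := by have := getSum_mul2 0; omega
    simp [h0]
  · rfl

theorem exit_good (N K left : Int) (hNS : N ≤ getSum K) (h1 : 1 ≤ left) (h3 : left ≤ K)
    (hlo : ∀ m, 1 ≤ m → m < left → N < Ssum K m) (hhi : Ssum K left < N) :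
    ∃ m, GoodIdx N K m ∧ K - left + 2 = K - m + 1 := by
  have hl2 : 2 ≤ left := by
    by_contra h
    have hL : left = 1 := by omega
    have h1' := Ssum_one K
    rw [hL] at hhi
    omega
  refine ⟨left - 1, ⟨by omega, by omega, le_of_lt (hlo _ (by omega) (by omega)), ?_⟩, by ring⟩
  rw [show left - 1 + 1 = left from by ring]
  exact hhi

theorem loopA_good (N K : Int) (hNS : N ≤ getSum K) :
    ∀ fuel left right, (right - left).toNat ≤ fuel →
      1 ≤ left → left ≤ right → right ≤ K →
      (∀ m, 1 ≤ m → m < left → N < Ssum K m) →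
      Ssum K right < N →
      ∃ m, GoodIdx N K m ∧ solveLoopA N K left right = K - m + 1 := by
  intro fuel
  induction fuel with
  | zero =>
      intro left right hf h1 h2 h3 hlo hhi
      have hlr : right = left := by omega
      rw [solveLoopA, dif_neg (by omega : ¬ left < right)]
      rw [hlr] at hhi
      exact exit_good N K left hNS h1 (by omega) hlo hhi
  | succ f ih =>
      intro left right hf h1 h2 h3 hlo hhi
      rw [solveLoopA]
      by_cases hlt : left < right
      · rw [dif_pos hlt]
        set mid := PySem.Int.floordiv (left + right) 2 with hmid
        have hmb : left ≤ mid ∧ mid < right := by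
          rw [hmid, PySem.Int.floordiv_eq_ediv_of_pos (show (0:Int) < 2 by norm_num)]
          omega
        have hsum : getSumOfTwo mid K = Ssum K mid := getSumOfTwo_eq_Ssum K (by omega)
        simp only [hsum]
        split_ifs with he hg
        · have hstep := Ssum_step K mid
          exact ⟨mid, ⟨by omega, by omega, by omega, by omega⟩, rfl⟩
        · refine ih (mid + 1) right (by omega) (by omega) (by omega) h3 ?_ hhi
          intro m hm1 hm2
          by_cases hc : m < left
          · exact hlo m hm1 hc
          · have := Ssum_anti (K := K) (a := m) (b := mid) hm1 (by omega)
            omega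
        · exact ih left mid (by omega) h1 (by omega) (by omega) hlo (by omega)
      · rw [dif_neg hlt]
        have hlr : right = left := by omega
        rw [hlr] at hhi
        exact exit_good N K left hNS h1 (by omega) hlo hhi

theorem loopB_good (N K : Int) (hNS : N ≤ getSum K) :
    ∀ fuel (i : Int), i.toNat ≤ fuel → 0 ≤ i → i ≤ K → Ssum K (i + 1) < N →
      ∃ m, GoodIdx N K m ∧
        solveLoopB N (Ssum K (i + 1)) (K - i) (PySem.List.pyRange i 0 (-1)) = K - m + 1 := by
  intro fuel
  induction fuel with
  | zero =>
      intro i hf h0 hK hlt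
      have : i = 0 := by omega
      subst this
      rw [show (0:Int) + 1 = 1 by ring, Ssum_one] at hlt
      omega
  | succ f ih =>
      intro i hf h0 hK hlt
      by_cases hi : 0 < i
      · rw [PySem.List.pyRange_neg_one_cons hi]
        rw [solveLoopB]
        have hstep : Ssum K (i + 1) + i = Ssum K i := (Ssum_step K i).symm
        split_ifs with h
        · exact ⟨i, ⟨by omega, hK, by omega, hlt⟩, by ring⟩
        · have h2 : Ssum K ((i - 1) + 1) < N := by
            rw [show i - 1 + 1 = i by ring]; omega
          obtain ⟨m, hm, hres⟩ := ih (i - 1) (by omega) (by omega) (by omega) h2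
          refine ⟨m, hm, ?_⟩
          rw [← hres]
          congr 1
          · rw [show i - 1 + 1 = i by ring]; omega
          · omega
      · have : i = 0 := by omega
        subst this
        rw [show (0:Int) + 1 = 1 by ring, Ssum_one] at hlt
        omega

theorem guard_eq (k : Int) : getSum (k - 1) = PySem.Int.floordiv ((k - 1) * k) 2 := by
  unfold getSum
  congr 1
  ring

-- ===== VERDICT (by name: the statement is the Claim_ definition above) =====
theorem solve_single_case_spec : Claim_equal_solve_single_case := by
  intro n k _hdom hpre
  unfold Spec_solve_single_case solve_single_case solve_single_case_alt
  rw [← guard_eq k]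
  split_ifs with h1 h2 h3
  · rfl
  · rfl
  · rfl
  -- main branch
  have hk : 1 ≤ k := by
    rcases hpre with h | h | h | h
    · exact h
    · exact absurd h h1
    · exact absurd h h2
    · exfalso
      apply h3
      have := getSum_mul2 (k - 1)
      nlinarith
  have hn2 : 2 ≤ n := by omega
  set N := n - 1 with hN
  set K := k - 1 with hKdef
  have hNK : K + 1 ≤ N := by omega
  have hNS : N ≤ getSum K := by omega
  have hK1 : 1 ≤ K := by
    by_contra h
    have hK0 : K = 0 := by omega
    rw [hK0] at hNS
    have := getSum_mul2 0
    omega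
  have hSKK : Ssum K K < N := by
    have h1' := Ssum_step K K
    have h2' := Ssum_top K
    omega
  obtain ⟨ma, hga, hra⟩ :=
    loopA_good N K hNS (K - 1).toNat 1 K (by omega) (by omega) (by omega) (by omega)
      (by intro m hm1 hm2; omega) hSKK
  have hS0 : Ssum K (K + 1) = 0 := Ssum_top K
  obtain ⟨mb, hgb, hrb⟩ :=
    loopB_good N K hNS K.toNat K (by omega) (by omega) (by omega) (by omega)
  rw [hra]
  have hinit : solveLoopB N 0 0 (PySem.List.pyRange K 0 (-1)) = K - mb + 1 := by
    rw [← hrb]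
    congr 1
    · omega
    · omega
  rw [hinit]
  rw [GoodIdx_uniq hga hgb]
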